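-- pv_equiv track=rewrite | github.com/subfish-zhou/SeqConjector | oeis/utils.py | detect_element_repetition
-- ===== SOURCE A (Python) =====
-- from typing import Optional
--
-- def detect_element_repetition(seq: list, max_repeat: int = 10) -> Optional[int]:
--     """
--     检测序列中每个元素是否重复了k次（REPEAT操作的逆）
--
--     例如: [1,1,2,2,3,3] 每个元素重复2次
--
--     Args:
--         seq: 输入序列
--         max_repeat: 最大重复次数
--
--     Returns:
--         重复次数k（如果存在），否则返回None
--
--     Examples:
--         >>> detect_element_repetition([1,1,2,2,3,3])
--         2
--         >>> detect_element_repetition([1,1,1,2,2,2,3,3,3])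
--         3
--         >>> detect_element_repetition([1,2,3,4,5])
--         None
--     """
--     if len(seq) < 2:
--         return None
--
--     # 尝试不同的重复次数
--     for k in range(2, min(max_repeat + 1, len(seq) + 1)):
--         if len(seq) % k != 0:
--             continue  # 长度必须是k的倍数
--
--         # 检查每k个元素是否相同
--         is_element_repeated = True
--         expected_len = len(seq) // k
--
--         for i in range(expected_len):
--             # 检查第i个"组"的k个元素是否都相同
--             base_val = seq[i * k]
--             for j in range(1, k):
--                 if i * k + j >= len(seq) or seq[i * k + j] != base_val:
--                     is_element_repeated = False
--                     break
--             if not is_element_repeated: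
--                 break
--
--         if is_element_repeated:
--             return k
--
--     return None
-- ===== SOURCE B (Python) =====
-- from typing import Optional
--
--
-- def _gcd(a: int, b: int) -> int:
--     while b:
--         a, b = b, a % b
--     return a
--
--
-- def detect_element_repetition(seq: list, max_repeat: int = 10) -> Optional[int]:
--     """Single pass: g = gcd of len(seq) and all change-point indices; the
--     answer is the smallest k in [2, min(max_repeat, len(seq))] dividing g."""
--     n = len(seq)
--     if n < 2:
--         return None
--     g = n
--     for t in range(1, n):
--         if seq[t] != seq[t - 1]:
--             g = _gcd(g, t)
--     for k in range(2, min(max_repeat, n) + 1):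
--         if g % k == 0:
--             return k
--     return None
-- ===== Notes on version B (the rewrite author's own statement) =====
-- stated objective: alternative
-- what changed: Instead of rescanning the whole sequence for every candidate k, B makes one adjacent-pairs pass computing the gcd of len(seq) and all change-point indices, then returns the smallest k in [2, min(max_repeat, len(seq))] that divides this gcd.
import Mathlib
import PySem

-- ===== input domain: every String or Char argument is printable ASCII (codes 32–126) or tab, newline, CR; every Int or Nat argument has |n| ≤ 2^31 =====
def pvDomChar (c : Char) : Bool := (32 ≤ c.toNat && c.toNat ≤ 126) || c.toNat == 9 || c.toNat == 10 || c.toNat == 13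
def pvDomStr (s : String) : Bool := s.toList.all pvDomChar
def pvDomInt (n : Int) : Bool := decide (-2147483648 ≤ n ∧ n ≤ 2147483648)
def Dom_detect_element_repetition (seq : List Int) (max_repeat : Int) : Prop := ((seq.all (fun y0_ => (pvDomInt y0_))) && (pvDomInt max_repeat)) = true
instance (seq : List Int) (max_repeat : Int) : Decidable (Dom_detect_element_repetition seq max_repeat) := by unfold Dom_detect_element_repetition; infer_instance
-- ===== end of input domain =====

-- B replaces A's per-candidate-k rescans of the sequence by a single pass computing the
-- gcd of len(seq) and all change-point indices; the answer is the smallest k in range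
-- dividing that gcd (objective: alternative algorithm).

-- ===== PORT A =====
-- inner j-loop with flag/break: group i is ok iff every j in range(1, k) passes
def pvA_groupOk (seq : List Int) (k i : Int) : Bool :=
  (PySem.List.pyRange 1 k 1).all fun j =>
    decide (i * k + j < (seq.length : Int)) &&
      (PySem.List.pyGet? seq (i * k + j) == PySem.List.pyGet? seq (i * k))

-- outer i-loop with flag/break
def pvA_ok (seq : List Int) (k : Int) : Bool :=
  (PySem.List.pyRange 0 (PySem.Int.floordiv (seq.length : Int) k) 1).all (pvA_groupOk seq k)

-- the k-loop with early return
def pvA_loop (seq : List Int) : List Int → Option Int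
  | [] => none
  | k :: ks =>
    if PySem.Int.mod (seq.length : Int) k ≠ 0 then pvA_loop seq ks
    else if pvA_ok seq k then some k
    else pvA_loop seq ks

def detect_element_repetition (seq : List Int) (max_repeat : Int) : Option Int :=
  if (seq.length : Int) < 2 then none
  else pvA_loop seq (PySem.List.pyRange 2 (min (max_repeat + 1) ((seq.length : Int) + 1)) 1)

-- ===== PORT B =====
-- Source B's hand-written Euclid (_gcd)
def pvB_gcd (a b : Nat) : Nat :=
  if _h : b = 0 then a else pvB_gcd b (a % b)
termination_by b
decreasing_by exact Nat.mod_lt _ (Nat.pos_of_ne_zero _h)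

-- g = gcd of n and all change-point indices t in range(1, n)
def pvB_g (seq : List Int) : Nat :=
  (List.range' 1 (seq.length - 1)).foldl
    (fun (g t : Nat) =>
      if PySem.List.pyGet? seq (t : Int) ≠ PySem.List.pyGet? seq ((t : Int) - 1)
      then pvB_gcd g t else g)
    seq.length

-- the k-loop with early return
def pvB_loop (g : Nat) : List Int → Option Int
  | [] => none
  | k :: ks => if PySem.Int.mod (g : Int) k = 0 then some k else pvB_loop g ks

def detect_element_repetition_alt (seq : List Int) (max_repeat : Int) : Option Int :=
  if (seq.length : Int) < 2 then none
  else pvB_loop (pvB_g seq) (PySem.List.pyRange 2 (min max_repeat (seq.length : Int) + 1) 1)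

-- ===== PRECONDITION & SPEC =====
def Spec_detect_element_repetition (seq : List Int) (max_repeat : Int) (out : Option Int) : Prop := out = detect_element_repetition_alt seq max_repeat
instance (seq : List Int) (max_repeat : Int) (out : Option Int) : Decidable (Spec_detect_element_repetition seq max_repeat out) := by unfold Spec_detect_element_repetition; infer_instance

-- ===== CLAIM (what is proved, stated in full; the proofs are below) =====
def Claim_equal_detect_element_repetition : Prop := ∀ (seq : List Int) (max_repeat : Int), Dom_detect_element_repetition seq max_repeat → Spec_detect_element_repetition seq max_repeat (detect_element_repetition seq max_repeat)

-- ===== LEMMAS AND PROOFS =====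

theorem pvB_gcd_eq_gcd (b a : Nat) : pvB_gcd a b = Nat.gcd a b := by
  induction b using Nat.strong_induction_on generalizing a with
  | _ b ih =>
    rw [pvB_gcd]
    split
    · simp [*]
    · next h =>
      calc pvB_gcd b (a % b) = Nat.gcd b (a % b) :=
            ih (a % b) (Nat.mod_lt _ (Nat.pos_of_ne_zero h)) b
        _ = Nat.gcd (a % b) b := Nat.gcd_comm _ _
        _ = Nat.gcd b a := (Nat.gcd_rec b a).symm
        _ = Nat.gcd a b := Nat.gcd_comm _ _

theorem dvd_foldl_gcd (κ : Nat) (c : Nat → Prop) [DecidablePred c] :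
    ∀ (l : List Nat) (a : Nat),
      (κ ∣ l.foldl (fun g t => if c t then pvB_gcd g t else g) a ↔
        κ ∣ a ∧ ∀ t ∈ l, c t → κ ∣ t) := by
  intro l
  induction l with
  | nil => simp
  | cons t l ih =>
    intro a
    simp only [List.foldl_cons, ih, List.mem_cons]
    by_cases hc : c t
    · rw [if_pos hc, pvB_gcd_eq_gcd, Nat.dvd_gcd_iff]
      constructor
      · rintro ⟨⟨ha, ht⟩, hl⟩
        refine ⟨ha, ?_⟩
        rintro u (rfl | hu) hcu
        · exact ht
        · exact hl u hu hcu
      · rintro ⟨ha, hall⟩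
        exact ⟨⟨ha, hall t (Or.inl rfl) hc⟩, fun u hu hcu => hall u (Or.inr hu) hcu⟩
    · rw [if_neg hc]
      constructor
      · rintro ⟨ha, hl⟩
        refine ⟨ha, ?_⟩
        rintro u (rfl | hu) hcu
        · exact absurd hcu hc
        · exact hl u hu hcu
      · rintro ⟨ha, hall⟩
        exact ⟨ha, fun u hu hcu => hall u (Or.inr hu) hcu⟩

-- change-point condition
def pvChg (seq : List Int) (κ : Nat) : Prop :=
  ∀ t : Nat, 1 ≤ t → t < seq.length → seq[t]? ≠ seq[t - 1]? → κ ∣ t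

-- κ divides pvB_g iff it divides n and every change-point index
theorem dvd_pvB_g (seq : List Int) (κ : Nat) :
    κ ∣ pvB_g seq ↔ κ ∣ seq.length ∧ pvChg seq κ := by
  unfold pvB_g pvChg
  rw [dvd_foldl_gcd κ
    (fun t => PySem.List.pyGet? seq (t : Int) ≠ PySem.List.pyGet? seq ((t : Int) - 1))]
  constructor
  · rintro ⟨h1, h2⟩
    refine ⟨h1, fun t ht1 ht2 hne => ?_⟩
    apply h2 t (by rw [List.mem_range'_1]; omega)
    have he : ((t : Int) - 1) = ((t - 1 : Nat) : Int) := by omega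
    simpa [he, PySem.List.pyGet?_natCast] using hne
  · rintro ⟨h1, h2⟩
    refine ⟨h1, fun t ht hne => ?_⟩
    rw [List.mem_range'_1] at ht
    apply h2 t ht.1 (by omega)
    have he : ((t : Int) - 1) = ((t - 1 : Nat) : Int) := by omega
    rw [he] at hne
    simpa [PySem.List.pyGet?_natCast] using hne

-- the block condition of A, over Nat indices
def pvBlocks (seq : List Int) (κ : Nat) : Prop :=
  ∀ i j : Nat, i < seq.length / κ → 1 ≤ j → j < κ →
    seq[i * κ + j]? = seq[i * κ]?

theorem blocks_iff_chg (seq : List Int) (κ : Nat) (hκ : 2 ≤ κ)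
    (hdvd : κ ∣ seq.length) : pvBlocks seq κ ↔ pvChg seq κ := by
  have hn : seq.length / κ * κ = seq.length := Nat.div_mul_cancel hdvd
  constructor
  · intro hb t ht1 ht2 hne
    by_contra hnd
    have hj1 : 1 ≤ t % κ := by
      rcases Nat.eq_zero_or_pos (t % κ) with h | h
      · exact absurd (Nat.dvd_of_mod_eq_zero h) hnd
      · exact h
    have hj2 : t % κ < κ := Nat.mod_lt _ (by omega)
    have htij : t = t / κ * κ + t % κ := by
      have h1 := Nat.div_add_mod t κ
      have h2 : κ * (t / κ) = t / κ * κ := Nat.mul_comm _ _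
      omega
    have hi : t / κ < seq.length / κ := by
      have h1 : t / κ * κ < seq.length / κ * κ := by omega
      exact Nat.lt_of_mul_lt_mul_right h1
    have e1 := hb (t / κ) (t % κ) hi hj1 hj2
    rw [← htij] at e1
    have e2 : seq[t - 1]? = seq[t / κ * κ]? := by
      rcases Nat.eq_or_lt_of_le hj1 with h1 | h1
      · have he : t - 1 = t / κ * κ := by omega
        rw [he]
      · have he : t - 1 = t / κ * κ + (t % κ - 1) := by omega
        rw [he]; exact hb _ _ hi (by omega) (by omega)
    exact hne (e1.trans e2.symm)
  · intro hc i j hi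
    induction j with
    | zero => omega
    | succ j ihj =>
      intro _ hjk
      have hik : (i + 1) * κ ≤ seq.length := by
        rw [← hn]; exact Nat.mul_le_mul_right κ hi
      have hik' : (i + 1) * κ = i * κ + κ := by ring
      have ht2 : i * κ + (j + 1) < seq.length := by omega
      have heq : seq[i * κ + (j + 1)]? = seq[i * κ + (j + 1) - 1]? := by
        by_contra hne
        have hd := hc (i * κ + (j + 1)) (by omega) ht2 hne
        have hm : (i * κ + (j + 1)) % κ = (j + 1) % κ := by rw [Nat.mul_comm, Nat.mul_add_mod]
        have hm2 : (j + 1) % κ = j + 1 := Nat.mod_eq_of_lt hjk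
        have hz : (i * κ + (j + 1)) % κ = 0 := Nat.mod_eq_zero_of_dvd hd
        omega
      have he1 : i * κ + (j + 1) - 1 = i * κ + j := by omega
      rw [he1] at heq
      rcases Nat.eq_zero_or_pos j with h0 | h0
      · subst h0; simpa using heq
      · exact heq.trans (ihj (by omega) (by omega))

theorem pvA_ok_iff (seq : List Int) (κ : Nat) (_hκ : 2 ≤ κ)
    (hdvd : κ ∣ seq.length) : pvA_ok seq (κ : Int) = true ↔ pvBlocks seq κ := by
  have hn : seq.length / κ * κ = seq.length := Nat.div_mul_cancel hdvd
  unfold pvA_ok pvA_groupOk pvBlocks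
  rw [PySem.Int.floordiv_natCast]
  simp only [List.all_eq_true, PySem.List.mem_pyRange_one, Bool.and_eq_true,
    decide_eq_true_eq, beq_iff_eq]
  constructor
  · intro h i j hi hj1 hj2
    have h1 := h (i : Int) ⟨by omega, by exact_mod_cast hi⟩ (j : Int)
      ⟨by exact_mod_cast hj1, by exact_mod_cast hj2⟩
    have hc1 : (i : Int) * (κ : Int) + (j : Int) = ((i * κ + j : Nat) : Int) := by push_cast; ring
    have hc2 : (i : Int) * (κ : Int) = ((i * κ : Nat) : Int) := by push_cast; ring
    rw [hc1, hc2, PySem.List.pyGet?_natCast, PySem.List.pyGet?_natCast] at h1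
    exact h1.2
  · intro h i hi j hj
    obtain ⟨ι, rfl⟩ : ∃ m : Nat, i = (m : Int) := ⟨i.toNat, by omega⟩
    obtain ⟨jn, rfl⟩ : ∃ m : Nat, j = (m : Int) := ⟨j.toNat, by omega⟩
    have hι : ι < seq.length / κ := by exact_mod_cast hi.2
    have hjn1 : 1 ≤ jn := by exact_mod_cast hj.1
    have hjn2 : jn < κ := by exact_mod_cast hj.2
    have hik : (ι + 1) * κ ≤ seq.length := by
      rw [← hn]; exact Nat.mul_le_mul_right κ hι
    have hik' : (ι + 1) * κ = ι * κ + κ := by ring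
    have hlt : ι * κ + jn < seq.length := by omega
    have hc1 : (ι : Int) * (κ : Int) + (jn : Int) = ((ι * κ + jn : Nat) : Int) := by push_cast; ring
    have hc2 : (ι : Int) * (κ : Int) = ((ι * κ : Nat) : Int) := by push_cast; ring
    rw [hc1, hc2, PySem.List.pyGet?_natCast, PySem.List.pyGet?_natCast]
    exact ⟨by exact_mod_cast hlt, h ι jn hι hjn1 hjn2⟩

theorem loop_eq (seq : List Int) : ∀ ks : List Int,
    (∀ k ∈ ks, 2 ≤ k ∧ k ≤ (seq.length : Int)) →
    pvA_loop seq ks = pvB_loop (pvB_g seq) ks := by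
  intro ks
  induction ks with
  | nil => intro _; rfl
  | cons k ks ih =>
    intro h
    obtain ⟨hk2, hkn⟩ := h k List.mem_cons_self
    obtain ⟨κ, rfl⟩ : ∃ m : Nat, k = (m : Int) := ⟨k.toNat, by omega⟩
    have hκ2 : 2 ≤ κ := by exact_mod_cast hk2
    have hκn : κ ≤ seq.length := by exact_mod_cast hkn
    have ih' := ih (fun u hu => h u (List.mem_cons_of_mem _ hu))
    rw [pvA_loop, pvB_loop]
    by_cases hg : κ ∣ pvB_g seq
    · obtain ⟨hgn, hchg⟩ := (dvd_pvB_g seq κ).1 hg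
      have hmodg : PySem.Int.mod ((pvB_g seq : Nat) : Int) (κ : Int) = 0 :=
        (PySem.Int.mod_eq_zero_iff_dvd _ _).mpr (Int.natCast_dvd_natCast.mpr hg)
      have hmodn : PySem.Int.mod ((seq.length : Nat) : Int) (κ : Int) = 0 :=
        (PySem.Int.mod_eq_zero_iff_dvd _ _).mpr (Int.natCast_dvd_natCast.mpr hgn)
      have hok : pvA_ok seq (κ : Int) = true :=
        (pvA_ok_iff seq κ hκ2 hgn).2 ((blocks_iff_chg seq κ hκ2 hgn).2 hchg)
      rw [if_neg (by simp [hmodn]), if_pos hok, if_pos hmodg]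
    · have hmodg : ¬ PySem.Int.mod ((pvB_g seq : Nat) : Int) (κ : Int) = 0 := fun hm =>
        hg (Int.natCast_dvd_natCast.mp ((PySem.Int.mod_eq_zero_iff_dvd _ _).mp hm))
      rw [if_neg hmodg]
      by_cases hgn : κ ∣ seq.length
      · have hmodn : PySem.Int.mod ((seq.length : Nat) : Int) (κ : Int) = 0 :=
          (PySem.Int.mod_eq_zero_iff_dvd _ _).mpr (Int.natCast_dvd_natCast.mpr hgn)
        have hok : pvA_ok seq (κ : Int) ≠ true := fun hok =>
          hg ((dvd_pvB_g seq κ).2 ⟨hgn, (blocks_iff_chg seq κ hκ2 hgn).1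
            ((pvA_ok_iff seq κ hκ2 hgn).1 hok)⟩)
        rw [if_neg (by simp [hmodn]), if_neg hok]
        exact ih'
      · have hmodn : PySem.Int.mod ((seq.length : Nat) : Int) (κ : Int) ≠ 0 := fun hm =>
          hgn (Int.natCast_dvd_natCast.mp ((PySem.Int.mod_eq_zero_iff_dvd _ _).mp hm))
        rw [if_pos hmodn]
        exact ih'

-- ===== VERDICT (by name: the statement is the Claim_ definition above) =====
theorem detect_element_repetition_spec : Claim_equal_detect_element_repetition := by
  intro seq mr _
  unfold Spec_detect_element_repetition detect_element_repetition detect_element_repetition_alt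
  by_cases h2 : (seq.length : Int) < 2
  · rw [if_pos h2, if_pos h2]
  · rw [if_neg h2, if_neg h2]
    have hb : min (mr + 1) ((seq.length : Int) + 1) = min mr (seq.length : Int) + 1 := by omega
    rw [hb]
    apply loop_eq
    intro k hk
    rw [PySem.List.mem_pyRange_one] at hk
    omega
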